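-- pv_equiv track=rewrite | github.com/Weva23/Matchingg | Backend/consultants/CVProcessor.py | _select_best_phone
-- ===== SOURCE A (Python) =====
-- from typing import Dict, List, Optional, Tuple
--
-- def _select_best_phone(phones: List[str]) -> str:
--     """Sélectionner le meilleur numéro parmi plusieurs"""
--     if len(phones) == 1:
--         return phones[0]
--
--     # Préférer format mauritanien
--     mauritanian_phones = [p for p in phones if p.startswith('+222')]
--     if mauritanian_phones:
--         return mauritanian_phones[0]
--
--     # Préférer format international
--     international_phones = [p for p in phones if p.startswith('+')]
--     if international_phones:
--         return international_phones[0]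
--
--     # Retourner le premier
--     return phones[0]
-- ===== SOURCE B (Python) =====
-- def _select_best_phone(phones):
--     """Pick the phone with the smallest format-priority rank (first on ties)."""
--     def _rank(p):
--         if p.startswith('+222'):
--             return 0
--         if p.startswith('+'):
--             return 1
--         return 2
--     return min(phones, key=_rank)
-- ===== Notes on version B (the rewrite author's own statement) =====
-- stated objective: idiomatic
-- what changed: Replaces the len==1 special case and two staged filter passes with a single keyed minimum: min(phones, key=rank) over a 3-level priority rank, whose first-minimal tie-breaking reproduces A's staged preference.
import Mathlib
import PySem

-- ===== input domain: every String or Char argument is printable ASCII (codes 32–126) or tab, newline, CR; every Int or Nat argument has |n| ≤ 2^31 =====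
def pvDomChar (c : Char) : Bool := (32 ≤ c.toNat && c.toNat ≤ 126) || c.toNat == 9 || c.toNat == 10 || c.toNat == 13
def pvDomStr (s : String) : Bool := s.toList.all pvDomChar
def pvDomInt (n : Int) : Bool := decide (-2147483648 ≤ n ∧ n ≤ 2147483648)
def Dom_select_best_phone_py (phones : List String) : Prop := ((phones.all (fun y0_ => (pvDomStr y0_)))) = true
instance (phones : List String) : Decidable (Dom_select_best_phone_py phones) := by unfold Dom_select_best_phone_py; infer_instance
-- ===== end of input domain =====

-- B replaces A's len==1 special case and staged filter passes with a single keyed minimum (min over a 3-level priority rank); idiomatic, same cost.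


-- ===== PORT A =====
def select_best_phone_py (phones : List String) : String :=
  if phones.length == 1 then (PySem.List.pyGet? phones 0).getD "" else
  let mauritanian_phones := phones.filter (fun p => PySem.Str.startswith p "+222")
  if mauritanian_phones ≠ [] then (PySem.List.pyGet? mauritanian_phones 0).getD "" else
  let international_phones := phones.filter (fun p => PySem.Str.startswith p "+")
  if international_phones ≠ [] then (PySem.List.pyGet? international_phones 0).getD "" else
  (PySem.List.pyGet? phones 0).getD ""

-- ===== PORT B =====
def pvRank (p : String) : Int :=
  if PySem.Str.startswith p "+222" then 0
  else if PySem.Str.startswith p "+" then 1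
  else 2

def select_best_phone_py_alt (phones : List String) : String :=
  (PySem.List.min? phones pvRank).getD ""

-- ===== PRECONDITION & SPEC =====
-- Pre_ excludes only the empty list, on which Python A raises IndexError and Python B raises ValueError.
def Pre_select_best_phone_py (phones : List String) : Prop := phones ≠ []
instance (phones : List String) : Decidable (Pre_select_best_phone_py phones) := by unfold Pre_select_best_phone_py; infer_instance
def pvWitness_select_best_phone_py : List String := ["+22212345678", "0612"]

def Spec_select_best_phone_py (phones : List String) (out : String) : Prop := out = select_best_phone_py_alt phones
instance (phones : List String) (out : String) : Decidable (Spec_select_best_phone_py phones out) := by unfold Spec_select_best_phone_py; infer_instance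

-- ===== CLAIM (what is proved, stated in full; the proofs are below) =====
def Claim_equal_select_best_phone_py : Prop := ∀ (phones : List String), Dom_select_best_phone_py phones → Pre_select_best_phone_py phones → Spec_select_best_phone_py phones (select_best_phone_py phones)

-- ===== LEMMAS AND PROOFS =====
-- Closed form for B's fold once the accumulator is seeded with m.
def pvRes (m : String) (l : List String) : String :=
  if pvRank m = 0 then m
  else ((l.filter (fun x => pvRank x == 0)).head?).getD
       (if pvRank m = 1 then m
        else ((l.filter (fun x => pvRank x == 1)).head?).getD m)

theorem pvRank_cases (x : String) : pvRank x = 0 ∨ pvRank x = 1 ∨ pvRank x = 2 := by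
  unfold pvRank; split_ifs <;> simp

theorem min?_seed (l : List String) (m : String) :
    PySem.List.min? (m :: l) pvRank = some (pvRes m l) := by
  induction l generalizing m with
  | nil => rcases pvRank_cases m with h | h | h <;> simp [PySem.List.min?, pvRes, h]
  | cons x t ih =>
    have h1 : PySem.List.min? (m :: x :: t) pvRank
        = PySem.List.min? ((if pvRank x < pvRank m then x else m) :: t) pvRank := by
      simp only [PySem.List.min?, List.foldl_cons]
      by_cases h : pvRank x < pvRank m <;> simp [h]
    rw [h1]
    by_cases h : pvRank x < pvRank m
    · rw [if_pos h, ih]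
      rcases pvRank_cases m with hm | hm | hm <;>
        rcases pvRank_cases x with hx | hx | hx <;>
          rw [hm, hx] at h <;> (try norm_num at h) <;> simp [pvRes, hm, hx]
    · rw [if_neg h, ih]
      rcases pvRank_cases m with hm | hm | hm <;>
        rcases pvRank_cases x with hx | hx | hx <;>
          rw [hm, hx] at h <;> (try norm_num at h) <;> simp [pvRes, hm, hx]

theorem rank0_eq (x : String) : (pvRank x == 0) = PySem.Str.startswith x "+222" := by
  unfold pvRank; split_ifs <;> simp_all

theorem rank1_eq (x : String) (h : PySem.Str.startswith x "+222" = false) :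
    (pvRank x == 1) = PySem.Str.startswith x "+" := by
  unfold pvRank
  rw [h]
  cases hp : PySem.Str.startswith x "+" <;> simp_all

theorem select_best_phone_py_spec : Claim_equal_select_best_phone_py := by
  intro phones _ hne
  obtain ⟨p, rest, rfl⟩ := List.exists_cons_of_ne_nil hne
  unfold Spec_select_best_phone_py select_best_phone_py select_best_phone_py_alt
  have hmin : PySem.List.min? (p :: rest) pvRank = some (pvRes p rest) :=
    min?_seed rest p
  rw [hmin, Option.getD_some]
  have hf0 : rest.filter (fun x => pvRank x == 0)
      = rest.filter (fun x => PySem.Str.startswith x "+222") :=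
    List.filter_congr (fun x _ => rank0_eq x)
  simp only [PySem.Str.startswith, show ("+222" : String).toList = ['+','2','2','2'] from rfl] at hf0
  by_cases hnil : rest = []
  · subst hnil
    rcases pvRank_cases p with hp | hp | hp <;>
      simp [pvRes, PySem.List.pyGet?, PySem.List.pyIdx?, hp]
  · have hlen : ((p :: rest).length == 1) = false := by
      simp [List.length_eq_zero_iff, hnil]
    rw [hlen, if_neg (by simp)]
    rcases pvRank_cases p with hp | hp | hp
    · have h222 : PySem.Str.startswith p "+222" = true := by
        have := rank0_eq p; rw [hp] at this; simpa using this.symm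
      simp only [PySem.Str.startswith, show ("+222" : String).toList = ['+','2','2','2'] from rfl] at h222
      simp [pvRes, hp, h222, PySem.List.pyGet?, PySem.List.pyIdx?]
    · have h222 : PySem.Str.startswith p "+222" = false := by
        revert hp; unfold pvRank; split_ifs <;> simp_all
      have hplus : PySem.Str.startswith p "+" = true := by
        revert hp; unfold pvRank; split_ifs <;> simp_all
      simp only [PySem.Str.startswith, show ("+222" : String).toList = ['+','2','2','2'] from rfl, show ("+" : String).toList = ['+'] from rfl] at h222 hplus
      cases hf : rest.filter (fun x => PySem.Chars.startswith x.toList ['+','2','2','2']) with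
      | cons h tl =>
        simp [pvRes, hp, hf0, hf, h222, PySem.List.pyGet?, PySem.List.pyIdx?]
      | nil =>
        simp [pvRes, hp, hf0, hf, h222, hplus, PySem.List.pyGet?, PySem.List.pyIdx?]
    · have h222 : PySem.Str.startswith p "+222" = false := by
        revert hp; unfold pvRank; split_ifs <;> simp_all
      have hplus : PySem.Str.startswith p "+" = false := by
        revert hp; unfold pvRank; split_ifs <;> simp_all
      simp only [PySem.Str.startswith, show ("+222" : String).toList = ['+','2','2','2'] from rfl, show ("+" : String).toList = ['+'] from rfl] at h222 hplus
      cases hf : rest.filter (fun x => PySem.Chars.startswith x.toList ['+','2','2','2']) with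
      | cons h tl =>
        simp [pvRes, hp, hf0, hf, h222, PySem.List.pyGet?, PySem.List.pyIdx?]
      | nil =>
        have hf1 : rest.filter (fun x => pvRank x == 1)
            = rest.filter (fun x => PySem.Str.startswith x "+") := by
          refine List.filter_congr (fun x hx => ?_)
          have hx222 : PySem.Str.startswith x "+222" = false := by
            by_contra hc
            have hmem : x ∈ rest.filter (fun x => PySem.Chars.startswith x.toList ['+','2','2','2']) :=
              List.mem_filter.mpr ⟨hx, by
                simp only [PySem.Str.startswith, show ("+222" : String).toList = ['+','2','2','2'] from rfl] at hc; simpa using hc⟩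
            simp [hf] at hmem
          exact rank1_eq x hx222
        simp only [PySem.Str.startswith, show ("+" : String).toList = ['+'] from rfl] at hf1
        cases hg : rest.filter (fun x => PySem.Chars.startswith x.toList ['+']) with
        | cons h tl =>
          simp [pvRes, hp, hf0, hf, hf1, hg, h222, hplus, PySem.List.pyGet?, PySem.List.pyIdx?]
        | nil =>
          simp [pvRes, hp, hf0, hf, hf1, hg, h222, hplus, PySem.List.pyGet?, PySem.List.pyIdx?]
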